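-- pv_equiv track=rewrite | github.com/joshparker71/PAConsulting | cyber-dojo-2025-12-12-5hqNXa/cyber-dojo-2025-12-12-5hqNXa/files/yahtzee.py | yahtzee
-- ===== SOURCE A (Python) =====
-- def yahtzee(dice):
--     match = True
--     for die in range(len(dice)-1):
--         if dice[die] !=dice[die+1]:
--             match = False
--     if match == True:
--         return 50
--     return 0
-- ===== SOURCE B (Python) =====
-- def yahtzee(dice):
--     return 50 if len(set(dice)) <= 1 else 0
-- ===== Notes on version B (the rewrite author's own statement) =====
-- stated objective: simpler
-- what changed: Replaces the adjacent-pairs index loop with a mutable flag by building a set (deduplication) and checking it has at most one distinct value.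
import Mathlib
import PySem

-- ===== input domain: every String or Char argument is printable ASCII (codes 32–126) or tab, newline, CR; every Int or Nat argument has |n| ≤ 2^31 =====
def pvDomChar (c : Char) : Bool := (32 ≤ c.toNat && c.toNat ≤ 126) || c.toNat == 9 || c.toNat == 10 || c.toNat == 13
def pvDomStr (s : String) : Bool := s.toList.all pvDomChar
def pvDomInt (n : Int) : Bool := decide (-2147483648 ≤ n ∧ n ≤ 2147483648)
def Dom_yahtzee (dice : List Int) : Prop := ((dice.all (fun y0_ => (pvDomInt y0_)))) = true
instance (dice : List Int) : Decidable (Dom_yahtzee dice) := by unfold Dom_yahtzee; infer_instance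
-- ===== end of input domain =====

-- B replaces A's adjacent-pairs index loop with a flag by deduplication into a set and a size test (simpler; same O(n)).

-- ===== PORT A =====
-- match = True; for die in range(len(dice)-1): if dice[die] != dice[die+1]: match = False
def yahtzee (dice : List Int) : Int :=
  let m : Bool := (PySem.List.pyRange 0 ((dice.length : Int) - 1) 1).foldl
    (fun m die => if PySem.List.pyGet? dice die ≠ PySem.List.pyGet? dice (die + 1) then false else m) true
  if m = true then 50 else 0

-- ===== PORT B =====
-- return 50 if len(set(dice)) <= 1 else 0
def yahtzee_alt (dice : List Int) : Int :=
  if PySem.Set.len (PySem.Set.ofList dice) ≤ 1 then 50 else 0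

-- ===== PRECONDITION & SPEC =====
def Spec_yahtzee (dice : List Int) (out : Int) : Prop := out = yahtzee_alt dice
instance (dice : List Int) (out : Int) : Decidable (Spec_yahtzee dice out) := by unfold Spec_yahtzee; infer_instance

-- ===== CLAIM (what is proved, stated in full; the proofs are below) =====
def Claim_equal_yahtzee : Prop := ∀ (dice : List Int), Dom_yahtzee dice → Spec_yahtzee dice (yahtzee dice)

-- ===== LEMMAS AND PROOFS =====

-- A's flag loop is the conjunction of the per-iteration tests.
theorem foldl_flag (P : Int → Prop) [DecidablePred P] (l : List Int) (b : Bool) :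
    l.foldl (fun m i => if P i then false else m) b = (b && decide (∀ i ∈ l, ¬ P i)) := by
  induction l generalizing b with
  | nil => simp
  | cons a tl ih =>
    rw [List.foldl_cons, ih]
    by_cases h : P a <;> simp [h]

-- adjacent-equality on all valid indices ↔ every element equals the head
theorem chain_head (d0 : Int) (l : List Int) :
    (∀ i : Int, 0 ≤ i → i < (d0 :: l).length - 1 →
        PySem.List.pyGet? (d0 :: l) i = PySem.List.pyGet? (d0 :: l) (i + 1)) ↔
      (∀ d ∈ l, d = d0) := by
  induction l generalizing d0 with
  | nil =>
    simp only [List.not_mem_nil, false_implies, implies_true, iff_true]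
    intro i h1 h2
    simp only [List.length_cons, List.length_nil] at h2
    omega
  | cons a tl ih =>
    constructor
    · intro h
      have h0 : a = d0 := by
        have := h 0 le_rfl (by simp only [List.length_cons]; push_cast; omega)
        simpa [PySem.List.pyGet?_zero_cons,
          show ((0 : Int) + 1) = (((0 : Nat) : Int) + 1) by norm_num,
          PySem.List.pyGet?_cons_succ] using this.symm
      have hrest : ∀ d ∈ tl, d = a := by
        rw [← ih a]
        intro i hi0 hlt
        obtain ⟨k, rfl⟩ := Int.eq_ofNat_of_zero_le hi0
        have hmain := h ((k : Int) + 1) (by omega)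
          (by simp only [List.length_cons] at hlt ⊢; push_cast at hlt ⊢; omega)
        calc PySem.List.pyGet? (a :: tl) (k : Int)
            = PySem.List.pyGet? (d0 :: a :: tl) ((k : Int) + 1) :=
              (PySem.List.pyGet?_cons_succ _ _ _).symm
          _ = PySem.List.pyGet? (d0 :: a :: tl) (((k : Int) + 1) + 1) := hmain
          _ = PySem.List.pyGet? (a :: tl) ((k : Int) + 1) := by
              rw [show ((k : Int) + 1 + 1) = (((k + 1 : Nat) : Int) + 1) by push_cast; ring,
                PySem.List.pyGet?_cons_succ]
              push_cast
              ring_nf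
      intro d hd
      rcases List.mem_cons.mp hd with rfl | hd
      · exact h0
      · exact (hrest d hd).trans h0
    · intro hall i hi0 hlt
      obtain ⟨k, rfl⟩ := Int.eq_ofNat_of_zero_le hi0
      have hk : k < (d0 :: a :: tl).length := by
        simp only [List.length_cons] at hlt ⊢; push_cast at hlt; omega
      have hk1 : k + 1 < (d0 :: a :: tl).length := by
        simp only [List.length_cons] at hlt ⊢; push_cast at hlt; omega
      have e1 : PySem.List.pyGet? (d0 :: a :: tl) (k : Int) = ((d0 :: a :: tl))[k]? :=
        PySem.List.pyGet?_natCast _ _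
      have e2 : PySem.List.pyGet? (d0 :: a :: tl) ((k : Int) + 1) = ((d0 :: a :: tl))[k + 1]? := by
        rw [show ((k : Int) + 1) = ((k + 1 : Nat) : Int) by push_cast; ring]
        exact PySem.List.pyGet?_natCast _ _
      rw [e1, e2, List.getElem?_eq_getElem hk, List.getElem?_eq_getElem hk1]
      have hv : ∀ (j : Nat) (hj : j < (d0 :: a :: tl).length), (d0 :: a :: tl)[j] = d0 := by
        intro j hj
        have hmem : (d0 :: a :: tl)[j] ∈ d0 :: a :: tl := List.getElem_mem hj
        rcases List.mem_cons.mp hmem with h | h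
        · exact h
        · exact hall _ h
      rw [hv k hk, hv (k + 1) hk1]

-- the dedup-set of a nonempty list has at most one element iff every element equals the head
theorem set_len_le_one (d0 : Int) (l : List Int) :
    PySem.Set.len (PySem.Set.ofList (d0 :: l)) ≤ 1 ↔ (∀ d ∈ l, d = d0) := by
  constructor
  · intro hlen d hd
    have hd0 : d0 ∈ PySem.Set.ofList (d0 :: l) := by
      rw [PySem.Set.mem_ofList]; exact List.mem_cons_self
    have hdm : d ∈ PySem.Set.ofList (d0 :: l) := by
      rw [PySem.Set.mem_ofList]; exact List.mem_cons_of_mem _ hd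
    cases hs : PySem.Set.ofList (d0 :: l) with
    | nil => rw [hs] at hd0; exact absurd hd0 (List.not_mem_nil)
    | cons x t =>
      have : t = [] := by
        have := hlen
        unfold PySem.Set.len at this
        rw [hs] at this
        simp only [List.length_cons] at this
        exact List.eq_nil_of_length_eq_zero (by omega)
      subst this
      rw [hs] at hd0 hdm
      simp only [List.mem_singleton] at hd0 hdm
      rw [hdm, hd0]
  · intro hall
    have hsub : ∀ x ∈ PySem.Set.ofList (d0 :: l), x = d0 := by
      intro x hx
      rw [PySem.Set.mem_ofList] at hx
      rcases List.mem_cons.mp hx with rfl | h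
      · rfl
      · exact hall x h
    have hnd : (PySem.Set.ofList (d0 :: l)).Nodup := PySem.Set.nodup_ofList _
    unfold PySem.Set.len
    cases hs : PySem.Set.ofList (d0 :: l) with
    | nil => simp
    | cons x t =>
      cases t with
      | nil => simp
      | cons y t2 =>
        exfalso
        rw [hs] at hsub hnd
        have hx : x = d0 := hsub x List.mem_cons_self
        have hy : y = d0 := hsub y (List.mem_cons_of_mem _ List.mem_cons_self)
        subst hx; subst hy
        simp at hnd

theorem yahtzee_eq (dice : List Int) : yahtzee dice = yahtzee_alt dice := by
  cases dice with
  | nil => simp [yahtzee, yahtzee_alt, PySem.List.pyRange, PySem.Set.ofList, PySem.Set.len]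
  | cons d0 l =>
    unfold yahtzee yahtzee_alt
    rw [foldl_flag]
    simp only [Bool.true_and, decide_eq_true_eq]
    by_cases hall : ∀ d ∈ l, d = d0
    · have hc : ∀ i ∈ PySem.List.pyRange 0 ((d0 :: l).length - 1) 1,
          ¬ PySem.List.pyGet? (d0 :: l) i ≠ PySem.List.pyGet? (d0 :: l) (i + 1) := by
        intro i hi
        rw [PySem.List.mem_pyRange_one] at hi
        exact not_not_intro ((chain_head d0 l).mpr hall i hi.1 hi.2)
      rw [if_pos hc, if_pos ((set_len_le_one d0 l).mpr hall)]
    · have hnc : ¬ ∀ i ∈ PySem.List.pyRange 0 ((d0 :: l).length - 1) 1,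
          ¬ PySem.List.pyGet? (d0 :: l) i ≠ PySem.List.pyGet? (d0 :: l) (i + 1) := by
        intro hc
        apply hall
        rw [← chain_head d0 l]
        intro i hi0 hlt
        exact not_not.mp (hc i (by rw [PySem.List.mem_pyRange_one]; exact ⟨hi0, hlt⟩))
      rw [if_neg hnc, if_neg (fun h => hall ((set_len_le_one d0 l).mp h))]

-- ===== VERDICT (by name: the statement is the Claim_ definition above) =====
theorem yahtzee_spec : Claim_equal_yahtzee := by
  intro dice _
  exact yahtzee_eq dice
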